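-- pv_equiv track=rewrite | github.com/DeciferBot/decifer-trading | Chief-Decifer-recovered/panels/kanban.py | _group_specs
-- ===== SOURCE A (Python) =====
-- COLUMNS = [
--     {
--         "id": "spec_complete",
--         "label": "Proposal",
--         "subtitle": "Research findings awaiting approval",
--         "color": "#74c0fc",
--         "bg": "#131e2a",
--         "border": "rgba(116,192,252,0.2)",
--         "dot": "#74c0fc",
--     },
--     {
--         "id": "backlog",
--         "label": "Backlog",
--         "subtitle": "Behind schedule — build later",
--         "color": "var(--cd-muted)",
--         "bg": "#1a1d23",
--         "border": "rgba(134,142,150,0.25)",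
--         "dot": "#868e96",
--     },
--     {
--         "id": "in_progress",
--         "label": "Progress",
--         "subtitle": "On roadmap — building now",
--         "color": "#ffd43b",
--         "bg": "#1e1c12",
--         "border": "rgba(255,212,59,0.2)",
--         "dot": "#ffd43b",
--     },
--     {
--         "id": "future",
--         "label": "Future",
--         "subtitle": "Valid idea — no current timeline",
--         "color": "#b197fc",
--         "bg": "#17131e",
--         "border": "rgba(177,151,252,0.2)",
--         "dot": "#b197fc",
--     },
--     {
--         "id": "complete",
--         "label": "Shipped",
--         "subtitle": "",
--         "color": "#51cf66",
--         "bg": "#111e15",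
--         "border": "rgba(81,207,102,0.2)",
--         "dot": "#51cf66",
--     },
-- ]
--
-- def _group_specs(specs):
--     grouped = {col["id"]: [] for col in COLUMNS}
--     for spec in specs:
--         status = spec.get("status", "backlog")
--         if status == "archived":
--             continue
--         if status not in grouped:
--             status = "backlog"
--         grouped[status].append(spec)
--     return grouped
-- ===== SOURCE B (Python) =====
-- COLUMN_IDS = ["spec_complete", "backlog", "in_progress", "future", "complete"]
--
-- def _norm_status(spec):
--     status = spec.get("status", "backlog")
--     return status if status in COLUMN_IDS else "backlog"
--
-- def _group_specs(specs):
--     return {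
--         col_id: [
--             s
--             for s in specs
--             if s.get("status", "backlog") != "archived" and _norm_status(s) == col_id
--         ]
--         for col_id in COLUMN_IDS
--     }
-- ===== Notes on version B (the rewrite author's own statement) =====
-- stated objective: alternative
-- what changed: Instead of routing each spec into a mutable bucket dict in one pass, B builds each column's bucket independently as a filter of specs (normalized status == column id, archived excluded), a dict comprehension over the fixed column ids.
import Mathlib
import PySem

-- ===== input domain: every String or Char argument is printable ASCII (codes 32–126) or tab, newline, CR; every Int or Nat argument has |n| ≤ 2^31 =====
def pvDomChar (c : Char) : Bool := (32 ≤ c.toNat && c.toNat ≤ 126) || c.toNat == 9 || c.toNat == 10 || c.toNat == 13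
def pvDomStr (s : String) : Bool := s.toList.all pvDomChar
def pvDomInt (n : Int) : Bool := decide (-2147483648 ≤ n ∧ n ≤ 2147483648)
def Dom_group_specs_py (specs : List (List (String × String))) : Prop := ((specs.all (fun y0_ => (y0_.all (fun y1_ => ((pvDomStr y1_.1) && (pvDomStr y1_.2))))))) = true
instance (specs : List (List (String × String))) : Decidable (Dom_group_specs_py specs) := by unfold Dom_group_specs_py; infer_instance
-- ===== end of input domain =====

-- B differs from A only in decomposition (per-column filters instead of one routing pass);
-- return values are identical on all inputs.

-- ===== PORT A =====
-- the ids of COLUMNS, in order (only "id" influences the result)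
def pvColumnIds : List String :=
  ["spec_complete", "backlog", "in_progress", "future", "complete"]

-- A's loop body: route one spec into its bucket
def pvRouteStep (g : PySem.Dict String (List (List (String × String))))
    (spec : List (String × String)) : PySem.Dict String (List (List (String × String))) :=
  let status := (PySem.Dict.mk spec).getD "status" "backlog"
  if status = "archived" then g
  else
    let status := if g.contains status then status else "backlog"
    g.modify status [] (fun l => l ++ [spec])

-- literal port of A: grouped = {id: [] for id in column ids}, then route each spec
def group_specs_py (specs : List (List (String × String))) :
    List (String × List (List (String × String))) :=
  let grouped : PySem.Dict String (List (List (String × String))) :=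
    pvColumnIds.foldl (fun d i => d.insert i []) PySem.Dict.empty
  (specs.foldl pvRouteStep grouped).items

-- ===== PORT B =====
-- normalized status: unknown statuses map to "backlog"
def pvNormStatus (spec : List (String × String)) : String :=
  let status := (PySem.Dict.mk spec).getD "status" "backlog"
  if status ∈ pvColumnIds then status else "backlog"

-- port of B: one filter of specs per column id
def group_specs_py_alt (specs : List (List (String × String))) :
    List (String × List (List (String × String))) :=
  pvColumnIds.map (fun c =>
    (c, specs.filter (fun s =>
          ((PySem.Dict.mk s).getD "status" "backlog" != "archived") && (pvNormStatus s == c))))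

-- ===== PRECONDITION & SPEC =====
def Spec_group_specs_py (specs : List (List (String × String))) (out : List (String × List (List (String × String)))) : Prop := out = group_specs_py_alt specs
instance (specs : List (List (String × String))) (out : List (String × List (List (String × String)))) : Decidable (Spec_group_specs_py specs out) := by unfold Spec_group_specs_py; infer_instance

-- ===== CLAIM (what is proved, stated in full; the proofs are below) =====
def Claim_equal_group_specs_py : Prop := ∀ (specs : List (List (String × String))), Dom_group_specs_py specs → Spec_group_specs_py specs (group_specs_py specs)

-- ===== LEMMAS AND PROOFS =====

-- A's routing loop, over any dict whose keys are exactly the column ids, yields per key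
-- the old bucket followed by B's filter of the remaining specs
theorem pv_loop_items
    (specs : List (List (String × String)))
    (d : PySem.Dict String (List (List (String × String))))
    (hk : d.keys = pvColumnIds) :
    (specs.foldl pvRouteStep d).items
    = pvColumnIds.map (fun c =>
        (c, d.getD c [] ++ specs.filter (fun s =>
              ((PySem.Dict.mk s).getD "status" "backlog" != "archived") && (pvNormStatus s == c)))) := by
  induction specs generalizing d with
  | nil =>
    simp only [List.foldl_nil, List.filter_nil, List.append_nil]
    rw [PySem.Dict.items_eq_map_keys d (by rw [hk]; decide) []]
    rw [hk]
  | cons s rest ih =>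
    simp only [List.foldl_cons]
    by_cases harch : (PySem.Dict.mk s).getD "status" "backlog" = "archived"
    · have hstep : pvRouteStep d s = d := by simp [pvRouteStep, harch]
      rw [hstep, ih d hk]
      apply List.map_congr_left
      intro c _
      simp [harch]
    · have hmem : pvNormStatus s ∈ pvColumnIds := by
        unfold pvNormStatus
        by_cases hm : (PySem.Dict.mk s).getD "status" "backlog" ∈ pvColumnIds
        · simp [hm]
        · simp [hm]; decide
      have hc : d.contains (pvNormStatus s) = true := by
        rw [PySem.Dict.contains_eq_decide_mem_keys, hk]
        simpa using hmem
      have hsel : (if d.contains ((PySem.Dict.mk s).getD "status" "backlog") then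
            (PySem.Dict.mk s).getD "status" "backlog" else "backlog") = pvNormStatus s := by
        rw [PySem.Dict.contains_eq_decide_mem_keys, hk]
        unfold pvNormStatus
        by_cases hm : (PySem.Dict.mk s).getD "status" "backlog" ∈ pvColumnIds <;> simp [hm]
      have hstep : pvRouteStep d s = d.modify (pvNormStatus s) [] (fun l => l ++ [s]) := by
        unfold pvRouteStep
        rw [if_neg harch, hsel]
      rw [hstep, ih (d.modify (pvNormStatus s) [] (fun l => l ++ [s]))
            (by rw [PySem.Dict.keys_modify, PySem.Dict.keys_insert_of_contains]
                · exact hk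
                · exact hc)]
      apply List.map_congr_left
      intro c _
      rw [PySem.Dict.getD_modify]
      by_cases hcc : c = pvNormStatus s
      · simp [hcc, harch]
      · have hne : ¬ (pvNormStatus s == c) = true := by
          simp only [beq_iff_eq]
          exact fun h => hcc h.symm
        simp [hcc, hne]

-- ===== VERDICT (by name: the statement is the Claim_ definition above) =====
theorem group_specs_py_spec : Claim_equal_group_specs_py := by
  intro specs _
  unfold Spec_group_specs_py group_specs_py group_specs_py_alt
  rw [pv_loop_items specs _ (by decide)]
  apply List.map_congr_left
  intro c hcmem
  have hinit : (pvColumnIds.foldl (fun d i => d.insert i []) PySem.Dict.empty).getD c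
      ([] : List (List (String × String))) = [] := by
    fin_cases hcmem <;> decide
  rw [hinit, List.nil_append]
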